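-- pv_equiv track=rewrite | github.com/elenaborisova/LeetCode-Solutions | recursion/encrypted_words.py | find_encrypted_word
-- ===== SOURCE A (Python) =====
-- def find_encrypted_word(s):
--     r = ''
--
--     if len(s) <= 2:
--         return s
--
--     if len(s) % 2 == 0:
--         mid = len(s) // 2 - 1
--     else:
--         mid = len(s) // 2
--
--     r += s[mid]
--     r += find_encrypted_word(s[:mid])
--     r += find_encrypted_word(s[mid + 1:])
--
--     return r
-- ===== SOURCE B (Python) =====
-- def find_encrypted_word(s):
--     # Iterative: explicit stack of index ranges, pre-order emission.
--     out = []
--     stack = [(0, len(s))]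
--     while stack:
--         lo, hi = stack.pop()
--         n = hi - lo
--         if n <= 2:
--             out.append(s[lo:hi])
--         else:
--             mid = lo + (n - 1) // 2
--             out.append(s[mid])
--             stack.append((mid + 1, hi))  # right: processed after left
--             stack.append((lo, mid))      # left: on top, processed first
--     return ''.join(out)
-- ===== Notes on version B (the rewrite author's own statement) =====
-- stated objective: alternative
-- what changed: Replaces the recursion with slice copies by an iterative loop over an explicit stack of (lo,hi) index ranges that emits characters in pre-order and joins once, avoiding per-call string slicing.
import Mathlib
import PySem

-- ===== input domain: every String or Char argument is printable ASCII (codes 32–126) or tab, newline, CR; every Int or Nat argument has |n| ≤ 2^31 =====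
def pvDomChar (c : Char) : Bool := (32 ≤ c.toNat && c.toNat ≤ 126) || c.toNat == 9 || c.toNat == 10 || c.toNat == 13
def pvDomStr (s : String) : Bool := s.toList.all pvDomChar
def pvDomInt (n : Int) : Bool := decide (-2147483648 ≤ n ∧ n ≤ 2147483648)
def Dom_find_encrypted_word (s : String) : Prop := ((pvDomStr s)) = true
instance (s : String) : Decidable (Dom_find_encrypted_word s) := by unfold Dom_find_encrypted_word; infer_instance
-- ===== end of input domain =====

-- B replaces A's recursion-with-slices by an explicit stack of (lo,hi) index ranges; alternative decomposition, same result.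

-- ===== PORT A =====
-- A's recursion, on the character list of s; slices s[:mid] / s[mid+1:] are the
-- exact nonnegative in-range slices l.take mid / l.drop (mid+1); s[mid] is an
-- in-range access (2 < len, mid ≤ len/2), so getD is exact.
def findEncA (l : List Char) : List Char :=
  if _h : l.length ≤ 2 then l
  else
    let mid := if l.length % 2 == 0 then l.length / 2 - 1 else l.length / 2
    l.getD mid ' ' :: (findEncA (l.take mid) ++ findEncA (l.drop (mid + 1)))
termination_by l.length
decreasing_by
  · simp only [List.length_take]; split <;> omega
  · simp only [List.length_drop]; split <;> omega

def find_encrypted_word (s : String) : String := String.ofList (findEncA s.toList)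

-- ===== PORT B =====
-- B's while-loop over the explicit stack; s[lo:hi] with 0 ≤ lo ≤ hi ≤ len is
-- exactly (s.drop lo).take (hi-lo); s[mid] is in range by the loop invariant.
def loopB (s : List Char) (st : List (Nat × Nat)) (acc : List Char) : List Char :=
  match st with
  | [] => acc
  | (lo, hi) :: st' =>
    if hi - lo ≤ 2 then
      loopB s st' (acc ++ (s.drop lo).take (hi - lo))
    else
      let mid := lo + (hi - lo - 1) / 2
      loopB s ((lo, mid) :: (mid + 1, hi) :: st') (acc ++ [s.getD mid ' '])
termination_by (st.map fun p => 2 * (p.2 - p.1)).sum + st.length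
decreasing_by
  · simp only [List.map_cons, List.sum_cons, List.length_cons]; omega
  · simp only [List.map_cons, List.sum_cons, List.length_cons]; omega

def find_encrypted_word_alt (s : String) : String :=
  String.ofList (loopB s.toList [(0, s.toList.length)] [])

-- ===== PRECONDITION & SPEC =====
def Spec_find_encrypted_word (s : String) (out : String) : Prop := out = find_encrypted_word_alt s
instance (s : String) (out : String) : Decidable (Spec_find_encrypted_word s out) := by unfold Spec_find_encrypted_word; infer_instance

-- ===== CLAIM (what is proved, stated in full; the proofs are below) =====
def Claim_equal_find_encrypted_word : Prop := ∀ (s : String), Dom_find_encrypted_word s → Spec_find_encrypted_word s (find_encrypted_word s)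

-- ===== LEMMAS AND PROOFS =====

-- A short segment (length ≤ 2) is emitted verbatim by findEncA.
lemma findEncA_short (l : List Char) (h : l.length ≤ 2) : findEncA l = l := by
  rw [findEncA]; simp [h]

-- A's branch chooses exactly the midpoint (len-1)/2.
lemma midA_eq (n : Nat) :
    (if n % 2 == 0 then n / 2 - 1 else n / 2) = (n - 1) / 2 := by
  by_cases h : n % 2 = 0 <;> simp [h] <;> omega

-- One unfolding of A's recursion on a long list.
lemma findEncA_split (l : List Char) (h : 3 ≤ l.length) :
    findEncA l = l.getD ((l.length - 1) / 2) ' ' ::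
      (findEncA (l.take ((l.length - 1) / 2)) ++ findEncA (l.drop ((l.length - 1) / 2 + 1))) := by
  rw [findEncA, dif_neg (by omega)]
  simp only [midA_eq]

-- Popping one range processes exactly findEncA of that segment.
lemma loopB_seg (s : List Char) :
    ∀ n lo hi st acc, hi - lo = n → hi ≤ s.length →
      loopB s ((lo, hi) :: st) acc = loopB s st (acc ++ findEncA ((s.drop lo).take (hi - lo))) := by
  intro n
  induction n using Nat.strong_induction_on with
  | _ n ih =>
    intro lo hi st acc hn hhi
    by_cases hb : hi - lo ≤ 2
    · rw [loopB]
      simp only [hb, if_pos]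
      rw [findEncA_short]
      simp only [List.length_take, List.length_drop]
      omega
    · have h3 : 3 ≤ hi - lo := by omega
      have hlolen : lo < s.length := by omega
      set m : Nat := (hi - lo - 1) / 2 with hm
      have hmlt : m < hi - lo := by omega
      have hmid_le : lo + m ≤ s.length := by omega
      rw [loopB]
      simp only [hb, if_neg, not_false_iff]
      rw [ih (lo + m - lo) (by omega) lo (lo + m) _ _ rfl (by omega),
          ih (hi - (lo + m + 1)) (by omega) (lo + m + 1) hi _ _ rfl hhi]
      congr 1
      have hseglen : ((s.drop lo).take (hi - lo)).length = hi - lo := by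
        simp only [List.length_take, List.length_drop]; omega
      rw [findEncA_split ((s.drop lo).take (hi - lo)) (by rw [hseglen]; omega)]
      simp only [hseglen, ← hm]
      have hc : ((s.drop lo).take (hi - lo)).getD m ' ' = s.getD (lo + m) ' ' := by
        simp only [List.getD_eq_getElem?_getD, List.getElem?_take_of_lt hmlt,
          List.getElem?_drop]
      have hleft : ((s.drop lo).take (hi - lo)).take m = (s.drop lo).take (lo + m - lo) := by
        rw [List.take_take]; congr 1; omega
      have hright : ((s.drop lo).take (hi - lo)).drop (m + 1)
          = (s.drop (lo + m + 1)).take (hi - (lo + m + 1)) := by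
        rw [List.drop_take, List.drop_drop]
        congr 1
        omega
      rw [hc, hleft, hright]
      simp [List.append_assoc]

-- ===== VERDICT (by name: the statement is the Claim_ definition above) =====
theorem find_encrypted_word_spec : Claim_equal_find_encrypted_word := by
  intro s _
  unfold Spec_find_encrypted_word find_encrypted_word find_encrypted_word_alt
  rw [loopB_seg s.toList (s.toList.length - 0) 0 s.toList.length [] [] rfl le_rfl]
  simp only [loopB, Nat.sub_zero, List.drop_zero, List.take_length, List.nil_append]
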